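-- pv_equiv track=rewrite | github.com/nguyenduchuyiu/BetaZero | betazero/policy/prompt.py | _format_chatml_from_messages
-- ===== SOURCE A (Python) =====
-- def _format_chatml_from_messages(messages: list[dict[str, str]]) -> str:
--     parts = []
--     for msg in messages:
--         role = msg["role"]
--         content = msg["content"]
--         parts.append(f"<|im_start|>{role}\n{content}\n<|im_end|>")
--
--     # Nếu tin nhắn cuối là assistant và rỗng hoặc là prefix, ta bỏ <|im_end|> cuối để model hoàn thiện
--     # Nhưng trong ChatML chuẩn cho completion:
--     res = "\n".join(parts)
--     if messages[-1]["role"] == "assistant":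
--         # Bỏ <|im_end|> cuối cùng để model gõ tiếp
--         res = res.rsplit("\n<|im_end|>", 1)[0] + "\n"
--     return clean_prompt(res)
--
-- def clean_prompt(text: str) -> str:
--     return text.replace('\u00a0', ' ')
-- ===== SOURCE B (Python) =====
-- def clean_prompt(text: str) -> str:
--     return text.replace('\u00a0', ' ')
--
--
-- def _format_chatml_from_messages(messages: list[dict[str, str]]) -> str:
--     # Build the assistant-at-end case during construction instead of A's rsplit post-processing.
--     last = messages[-1]  # IndexError on an empty list, like A
--     blocks = [f"<|im_start|>{m['role']}\n{m['content']}\n<|im_end|>" for m in messages[:-1]]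
--     if last["role"] == "assistant":
--         blocks.append(f"<|im_start|>assistant\n{last['content']}\n")
--     else:
--         blocks.append(f"<|im_start|>{last['role']}\n{last['content']}\n<|im_end|>")
--     return clean_prompt("\n".join(blocks))
-- ===== Notes on version B (the rewrite author's own statement) =====
-- stated objective: simpler
-- what changed: B builds the open-ended assistant block directly while constructing the parts list (handling messages[-1] separately), instead of A's join-then-rsplit post-processing that cuts the last '\n<|im_end|>' back out of the joined string.
import Mathlib
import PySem

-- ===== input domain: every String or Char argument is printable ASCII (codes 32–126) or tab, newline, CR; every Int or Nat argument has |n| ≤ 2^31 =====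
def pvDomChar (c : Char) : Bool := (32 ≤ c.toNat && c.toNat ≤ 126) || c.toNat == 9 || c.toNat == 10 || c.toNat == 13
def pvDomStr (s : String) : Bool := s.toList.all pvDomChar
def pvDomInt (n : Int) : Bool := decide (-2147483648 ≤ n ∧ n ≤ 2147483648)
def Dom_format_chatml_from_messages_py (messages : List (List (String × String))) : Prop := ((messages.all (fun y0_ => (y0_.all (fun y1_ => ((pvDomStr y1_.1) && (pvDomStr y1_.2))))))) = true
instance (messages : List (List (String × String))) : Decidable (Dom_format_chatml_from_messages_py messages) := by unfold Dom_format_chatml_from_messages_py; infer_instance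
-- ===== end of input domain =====

-- B drops A's rsplit post-processing: it emits the open-ended assistant block directly while
-- building the parts, instead of cutting the last "\n<|im_end|>" back out of the joined string.

-- shared module helper (clean_prompt in the Python source, used by A and B alike)
def clean_prompt (text : String) : String := PySem.Str.replace text "\u00A0" " "

-- ===== PORT A =====
def format_chatml_from_messages_py (messages : List (List (String × String))) : String :=
  let parts : List String := messages.foldl (fun parts msg =>
    -- msg["role"] / msg["content"]: a missing key is a KeyError, excluded by Pre_
    let role := ((PySem.Dict.ofList msg).get? "role").getD ""
    let content := ((PySem.Dict.ofList msg).get? "content").getD ""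
    parts ++ ["<|im_start|>" ++ role ++ "\n" ++ content ++ "\n<|im_end|>"]) []
  let res := PySem.Str.join "\n" parts
  -- messages[-1]: IndexError on [], excluded by Pre_
  let res :=
    if (((PySem.Dict.ofList ((PySem.List.pyGet? messages (-1)).getD [])).get? "role").getD "") == "assistant" then
      -- res.rsplit("\n<|im_end|>", 1)[0]: everything strictly before the LAST occurrence of the
      -- separator, or the whole string if it does not occur — exact via PySem.Str.rfind
      (let i := PySem.Str.rfind res "\n<|im_end|>"
       if i == -1 then res else String.ofList (res.toList.take i.toNat)) ++ "\n"
    else res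
  clean_prompt res

-- ===== PORT B =====
def format_chatml_from_messages_py_alt (messages : List (List (String × String))) : String :=
  let last := (PySem.List.pyGet? messages (-1)).getD []   -- IndexError on [], excluded by Pre_
  let blocks : List String := (PySem.List.slice messages none (some (-1))).map (fun m =>
    "<|im_start|>" ++ ((PySem.Dict.ofList m).get? "role").getD "" ++ "\n" ++
      ((PySem.Dict.ofList m).get? "content").getD "" ++ "\n<|im_end|>")
  let lastBlock :=
    if ((PySem.Dict.ofList last).get? "role").getD "" == "assistant" then
      "<|im_start|>assistant\n" ++ ((PySem.Dict.ofList last).get? "content").getD "" ++ "\n"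
    else
      "<|im_start|>" ++ ((PySem.Dict.ofList last).get? "role").getD "" ++ "\n" ++
        ((PySem.Dict.ofList last).get? "content").getD "" ++ "\n<|im_end|>"
  clean_prompt (PySem.Str.join "\n" (blocks ++ [lastBlock]))

-- ===== PRECONDITION & SPEC =====
-- Pre_ excludes exactly the inputs where the Python A raises: the empty list (IndexError on
-- messages[-1]) and any message lacking a "role" or "content" key (KeyError).
def Pre_format_chatml_from_messages_py (messages : List (List (String × String))) : Prop :=
  messages ≠ [] ∧ ∀ m ∈ messages,
    (PySem.Dict.ofList m).contains "role" = true ∧ (PySem.Dict.ofList m).contains "content" = true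
instance (messages : List (List (String × String))) : Decidable (Pre_format_chatml_from_messages_py messages) := by unfold Pre_format_chatml_from_messages_py; infer_instance

def pvWitness_format_chatml_from_messages_py : (List (List (String × String))) :=
  [[("role", "system"), ("content", "s")], [("role", "user"), ("content", "hi")],
   [("role", "assistant"), ("content", "ok")]]

def Spec_format_chatml_from_messages_py (messages : List (List (String × String))) (out : String) : Prop := out = format_chatml_from_messages_py_alt messages
instance (messages : List (List (String × String))) (out : String) : Decidable (Spec_format_chatml_from_messages_py messages out) := by unfold Spec_format_chatml_from_messages_py; infer_instance

-- ===== CLAIM (what is proved, stated in full; the proofs are below) =====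
def Claim_equal_format_chatml_from_messages_py : Prop := ∀ (messages : List (List (String × String))), Dom_format_chatml_from_messages_py messages → Pre_format_chatml_from_messages_py messages → Spec_format_chatml_from_messages_py messages (format_chatml_from_messages_py messages)

-- ===== LEMMAS AND PROOFS =====

theorem strings_eq_of_toList {s t : String} (h : s.toList = t.toList) : s = t := by
  have h2 := congrArg String.ofList h
  simpa using h2

theorem inter_cc (sep x y : List Char) (t : List (List Char)) :
    sep.intercalate (x :: y :: t) = x ++ sep ++ sep.intercalate (y :: t) := by
  simp [List.intercalate, List.intersperse]

theorem inter_sing (sep a : List Char) : sep.intercalate [a] = a := by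
  simp [List.intercalate, List.intersperse]

-- appending b inside the last joined part is appending b after the join
theorem inter_last (sep : List Char) (l : List (List Char)) (a b : List Char) :
    sep.intercalate (l ++ [a ++ b]) = sep.intercalate (l ++ [a]) ++ b := by
  induction l with
  | nil => simp [inter_sing]
  | cons x xs ih =>
    cases xs with
    | nil => simp only [List.nil_append, List.cons_append, inter_cc, inter_sing]; simp
    | cons y ys =>
      simp only [List.cons_append] at ih ⊢
      rw [inter_cc, inter_cc, ih]; simp

theorem rfind_go_at (ys sub : List Char) (hsub : sub ≠ []) :
    ∀ k, PySem.Chars.rfind.go (ys ++ sub) sub (ys.length + k) = (ys.length : Int) := by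
  intro k
  induction k with
  | zero =>
    rw [Nat.add_zero]
    have hdrop : (ys ++ sub).drop ys.length = sub := by simp
    cases hys : ys.length with
    | zero =>
      have hy : ys = [] := List.eq_nil_of_length_eq_zero hys
      subst hy
      unfold PySem.Chars.rfind.go
      simp [List.isPrefixOf_iff_prefix]
    | succ j =>
      rw [hys] at hdrop
      unfold PySem.Chars.rfind.go
      simp [hdrop, List.isPrefixOf_iff_prefix]
  | succ k ih =>
    rw [show ys.length + (k+1) = (ys.length + k) + 1 by omega]
    unfold PySem.Chars.rfind.go
    have hpre : sub.isPrefixOf ((ys ++ sub).drop (ys.length + k + 1)) = false := by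
      rw [Bool.eq_false_iff]
      intro hc
      have h1 := (List.isPrefixOf_iff_prefix.mp hc).length_le
      simp only [List.length_drop, List.length_append] at h1
      have := List.length_pos_iff.mpr hsub
      omega
    simp [hpre]
    exact ih

-- the LAST occurrence of sub in ys ++ sub is the final one, at index ys.length
theorem rfind_append_self (ys sub : List Char) (hsub : sub ≠ []) :
    PySem.Chars.rfind (ys ++ sub) sub = (ys.length : Int) := by
  unfold PySem.Chars.rfind
  rw [show (ys ++ sub).length = ys.length + sub.length by simp]
  exact rfind_go_at ys sub hsub sub.length

theorem pyGet_concat_neg_one {α : Type} (l : List α) (a : α) :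
    PySem.List.pyGet? (l ++ [a]) (-1) = some a := by
  simp [PySem.List.pyGet?, PySem.List.pyIdx?]

theorem slice_neg_one_dropLast {α : Type} (l : List α) :
    PySem.List.slice l none (some (-1)) = l.dropLast := by
  have hb : PySem.List.clampIdx l.length (-1) = l.length - 1 := by
    simp only [PySem.List.clampIdx]
    split_ifs <;> omega
  simp [PySem.List.slice, hb, List.dropLast_eq_take]

theorem foldl_append_map {α β : Type} (f : α → β) (l : List α) (acc : List β) :
    l.foldl (fun ps m => ps ++ [f m]) acc = acc ++ l.map f := by
  induction l generalizing acc with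
  | nil => simp
  | cons x xs ih => simp [List.foldl_cons, ih]

-- ===== VERDICT (by name: the statement is the Claim_ definition above) =====
theorem format_chatml_from_messages_py_spec : Claim_equal_format_chatml_from_messages_py := by
  intro messages _hdom hpre
  unfold Spec_format_chatml_from_messages_py
  obtain ⟨hne, -⟩ := hpre
  obtain ⟨init, lastm, rfl⟩ : ∃ init lastm, messages = init ++ [lastm] := by
    rcases List.eq_nil_or_concat messages with h | ⟨L, b, h⟩
    · exact absurd h hne
    · exact ⟨L, b, by simpa [List.concat_eq_append] using h⟩
  unfold format_chatml_from_messages_py format_chatml_from_messages_py_alt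
  simp only [foldl_append_map, pyGet_concat_neg_one, slice_neg_one_dropLast,
    List.dropLast_concat, Option.getD_some, List.nil_append, List.map_append, List.map_cons,
    List.map_nil]
  by_cases hrole : (((PySem.Dict.ofList lastm).get? "role").getD "" == "assistant") = true
  · have hr : ((PySem.Dict.ofList lastm).get? "role").getD "" = "assistant" := by
      exact eq_of_beq hrole
    rw [if_pos hrole, if_pos hrole, hr]
    apply congrArg clean_prompt
    apply strings_eq_of_toList
    set c := ((PySem.Dict.ofList lastm).get? "content").getD "" with hc
    set L := List.map (fun m => "<|im_start|>" ++ ((PySem.Dict.ofList m).get? "role").getD "" ++ "\n" ++ ((PySem.Dict.ofList m).get? "content").getD "" ++ "\n<|im_end|>") init with hL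
    have hjoin : (PySem.Str.join "\n" (L ++ ["<|im_start|>" ++ "assistant" ++ "\n" ++ c ++ "\n<|im_end|>"])).toList
        = "\n".toList.intercalate (L.map String.toList ++ [("<|im_start|>assistant\n" ++ c).toList]) ++ "\n<|im_end|>".toList := by
      rw [PySem.Str.toList_join]
      simp only [List.map_append, List.map_cons, List.map_nil, PySem.Chars.join]
      rw [show ("<|im_start|>" ++ "assistant" ++ "\n" ++ c ++ "\n<|im_end|>").toList = ("<|im_start|>assistant\n" ++ c).toList ++ "\n<|im_end|>".toList by simp [String.toList_append]]
      exact inter_last _ _ _ _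
    set Y := "\n".toList.intercalate (L.map String.toList ++ [("<|im_start|>assistant\n" ++ c).toList]) with hY
    have hrfind : PySem.Str.rfind (PySem.Str.join "\n" (L ++ ["<|im_start|>" ++ "assistant" ++ "\n" ++ c ++ "\n<|im_end|>"])) "\n<|im_end|>" = (Y.length : Int) := by
      rw [PySem.Str.rfind_eq, hjoin]
      exact rfind_append_self Y _ (by decide)
    have hne : (((Y.length : Int)) == -1) = false := by
      rw [beq_eq_false_iff_ne]
      omega
    rw [hrfind, hne, if_neg (by simp)]
    simp only [String.toList_append, String.toList_ofList, Int.toNat_natCast, hjoin, List.take_left]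
    rw [PySem.Str.toList_join]
    simp only [List.map_append, List.map_cons, List.map_nil, PySem.Chars.join, String.toList_append]
    rw [inter_last, hY, String.toList_append]
  · rw [if_neg hrole, if_neg hrole]
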